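-- pv_equiv track=rewrite | github.com/Tarasovdv/Py-HW | HW3/Task5.py | fib_n
-- ===== SOURCE A (Python) =====
-- def fib_n(num):
--     arr = []
--     x, y = 1, 1
--     for i in range(num):
--         arr.append(x)
--         x, y = y, x + y
--     x, y = 0, 1
--     for i in range(num+1):
--         arr.insert(0, x)
--         x, y = y, x - y
--     return (arr)
-- ===== SOURCE B (Python) =====
-- def fib_n(num):
--     f = [0, 1]
--     for _ in range(max(num - 1, 0)):
--         f.append(f[-1] + f[-2])
--     pre = [(-1) ** (k + 1) * f[k] for k in range(num, -1, -1)]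
--     pos = [f[k] for k in range(1, num + 1)]
--     return pre + pos
-- ===== Notes on version B (the rewrite author's own statement) =====
-- stated objective: alternative
-- what changed: Replaced A's backward recurrence that prepends with arr.insert(0, x) by one forward Fibonacci pass plus the alternating-sign identity relating each negative-index Fibonacci number to its positive-index counterpart, building both halves by indexing into that list and concatenating.
import Mathlib
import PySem

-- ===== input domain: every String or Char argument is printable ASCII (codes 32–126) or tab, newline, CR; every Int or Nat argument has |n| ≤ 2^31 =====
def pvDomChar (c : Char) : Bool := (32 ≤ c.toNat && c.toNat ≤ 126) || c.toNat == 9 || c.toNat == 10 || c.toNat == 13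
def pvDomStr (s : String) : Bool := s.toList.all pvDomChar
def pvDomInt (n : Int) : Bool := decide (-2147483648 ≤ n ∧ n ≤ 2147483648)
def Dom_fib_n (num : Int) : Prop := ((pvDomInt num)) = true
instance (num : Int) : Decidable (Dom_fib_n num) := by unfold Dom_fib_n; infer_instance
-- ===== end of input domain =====

-- B replaces A's backward recurrence with insert(0, …) by one forward fib pass plus the
-- alternating-sign identity relating negative-index to positive-index Fibonacci numbers.

-- ===== PORT A =====
-- arr = []; x, y = 1, 1; for i in range(num): arr.append(x); x, y = y, x + y
def fib_n_loop1 (num : Int) : List Int × Int × Int :=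
  (PySem.List.pyRange 0 num 1).foldl
    (fun (st : List Int × Int × Int) _ => (st.1 ++ [st.2.1], st.2.2, st.2.1 + st.2.2))
    ([], 1, 1)

-- x, y = 0, 1; for i in range(num+1): arr.insert(0, x); x, y = y, x - y; return arr
def fib_n (num : Int) : List Int :=
  ((PySem.List.pyRange 0 (num + 1) 1).foldl
    (fun (st : List Int × Int × Int) _ => (st.2.1 :: st.1, st.2.2, st.2.1 - st.2.2))
    ((fib_n_loop1 num).1, 0, 1)).1

-- ===== PORT B =====
-- f = [0, 1]; for _ in range(max(num-1, 0)): f.append(f[-1] + f[-2])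
-- (indices -1, -2 and, below, k are always in range since len f ≥ 2, so getD's default is never used)
def fib_n_alt_f (num : Int) : List Int :=
  (PySem.List.pyRange 0 (max (num - 1) 0) 1).foldl
    (fun (f : List Int) _ => f ++ [PySem.List.pyGetD f (-1) 0 + PySem.List.pyGetD f (-2) 0])
    [0, 1]

-- pre = [(-1)**(k+1) * f[k] for k in range(num, -1, -1)]; pos = [f[k] for k in range(1, num+1)]
def fib_n_alt (num : Int) : List Int :=
  (PySem.List.pyRange num (-1) (-1)).map
    (fun k => (-1 : Int) ^ (k + 1).toNat * PySem.List.pyGetD (fib_n_alt_f num) k 0)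
  ++ (PySem.List.pyRange 1 (num + 1) 1).map
    (fun k => PySem.List.pyGetD (fib_n_alt_f num) k 0)

-- ===== PRECONDITION & SPEC =====
def Spec_fib_n (num : Int) (out : List Int) : Prop := out = fib_n_alt num
instance (num : Int) (out : List Int) : Decidable (Spec_fib_n num out) := by unfold Spec_fib_n; infer_instance

-- ===== CLAIM (what is proved, stated in full; the proofs are below) =====
def Claim_equal_fib_n : Prop := ∀ (num : Int), Dom_fib_n num → Spec_fib_n num (fib_n num)

-- ===== LEMMAS AND PROOFS =====

-- the usual Fibonacci numbers, as integers
def fib : Nat → Int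
  | 0 => 0
  | 1 => 1
  | n + 2 => fib n + fib (n + 1)

-- signed Fibonacci: sfib k = F(-k)
def sfib (k : Nat) : Int := (-1) ^ (k + 1) * fib k

lemma sfib_rec (k : Nat) : sfib (k + 2) = sfib k - sfib (k + 1) := by
  simp only [sfib, fib]
  ring

-- a fold that ignores the list elements is an iterate of the step function
lemma foldl_const {α β : Type} (g : α → α) (l : List β) (init : α) :
    l.foldl (fun s _ => g s) init = g^[l.length] init := by
  induction l generalizing init with
  | nil => rfl
  | cons a t ih => simp [List.foldl_cons, ih, Function.iterate_succ_apply]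


-- invariant of A's first loop
lemma loopA1 (n : Nat) (acc : List Int) (k : Nat) :
    (fun (st : List Int × Int × Int) => (st.1 ++ [st.2.1], st.2.2, st.2.1 + st.2.2))^[n]
      (acc, fib (k + 1), fib (k + 2))
    = (acc ++ (List.range n).map (fun j => fib (k + 1 + j)), fib (k + 1 + n), fib (k + 2 + n)) := by
  induction n generalizing acc k with
  | zero => simp
  | succ m ih =>
    rw [Function.iterate_succ_apply]
    show (fun (st : List Int × Int × Int) => (st.1 ++ [st.2.1], st.2.2, st.2.1 + st.2.2))^[m]
        (acc ++ [fib (k + 1)], fib (k + 1 + 1), fib (k + 1) + fib (k + 1 + 1)) = _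
    rw [show fib (k + 1) + fib (k + 1 + 1) = fib (k + 1 + 2) from rfl,
        ih (acc ++ [fib (k + 1)]) (k + 1)]
    have e1 : k + 1 + 1 + m = k + 1 + (m + 1) := by omega
    have e2 : k + 1 + 2 + m = k + 2 + (m + 1) := by omega
    rw [e1, e2]
    refine Prod.ext ?_ rfl
    rw [List.range_succ_eq_map, List.map_cons, List.map_map, List.append_assoc]
    simp only [Nat.add_zero, List.singleton_append]
    refine congrArg (acc ++ ·) (congrArg (fib (k + 1) :: ·) ?_)
    refine List.map_congr_left (fun j _ => ?_)
    simp only [Function.comp_apply]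
    congr 1
    omega

-- invariant of A's second loop
lemma loopA2 (n : Nat) (acc : List Int) (k : Nat) :
    (fun (st : List Int × Int × Int) => (st.2.1 :: st.1, st.2.2, st.2.1 - st.2.2))^[n]
      (acc, sfib k, sfib (k + 1))
    = (((List.range n).map (fun j => sfib (k + j))).reverse ++ acc, sfib (k + n), sfib (k + n + 1)) := by
  induction n generalizing acc k with
  | zero => simp
  | succ m ih =>
    rw [Function.iterate_succ_apply]
    show (fun (st : List Int × Int × Int) => (st.2.1 :: st.1, st.2.2, st.2.1 - st.2.2))^[m]
        (sfib k :: acc, sfib (k + 1), sfib k - sfib (k + 1)) = _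
    rw [show sfib k - sfib (k + 1) = sfib (k + 1 + 1) from (sfib_rec k).symm,
        ih (sfib k :: acc) (k + 1)]
    have e1 : k + 1 + m = k + (m + 1) := by omega
    rw [e1]
    refine Prod.ext ?_ rfl
    rw [List.range_succ_eq_map, List.map_cons, List.map_map]
    simp only [Nat.add_zero, List.reverse_cons, List.append_assoc, List.singleton_append]
    refine congrArg (· ++ sfib k :: acc) (congrArg List.reverse ?_)
    refine List.map_congr_left (fun j _ => ?_)
    simp only [Function.comp_apply]
    congr 1
    omega

-- invariant of B's fib-building loop
lemma loopB_aux (m t : Nat) :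
    (fun (f : List Int) => f ++ [PySem.List.pyGetD f (-1) 0 + PySem.List.pyGetD f (-2) 0])^[m]
      ((List.range (t + 2)).map fib)
    = (List.range (t + 2 + m)).map fib := by
  induction m generalizing t with
  | zero => rfl
  | succ p ih =>
    rw [Function.iterate_succ_apply]
    have hlen : ((List.range (t + 2)).map fib).length = t + 2 := by simp
    have h1 : PySem.List.pyGetD ((List.range (t + 2)).map fib) (-1) 0 = fib (t + 1) := by
      rw [PySem.List.pyGetD_neg_ofNat _ 1 0 (by omega) (by rw [hlen]; omega)]
      simp
    have h2 : PySem.List.pyGetD ((List.range (t + 2)).map fib) (-2) 0 = fib t := by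
      rw [PySem.List.pyGetD_neg_ofNat _ 2 0 (by omega) (by rw [hlen]; omega)]
      simp
    have hfib : fib (t + 1) + fib t = fib (t + 2) := by
      show _ = fib t + fib (t + 1)
      ring
    have hstep : (List.range (t + 2)).map fib ++ [fib (t + 1) + fib t]
        = (List.range (t + 1 + 2)).map fib := by
      rw [hfib, show t + 1 + 2 = (t + 2) + 1 from rfl]
      conv_rhs => rw [List.range_succ, List.map_append, List.map_cons, List.map_nil]
    show (fun (f : List Int) => f ++ [PySem.List.pyGetD f (-1) 0 + PySem.List.pyGetD f (-2) 0])^[p]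
        ((List.range (t + 2)).map fib ++ [_ + _]) = _
    rw [h1, h2, hstep, ih (t + 1)]
    have e : t + 1 + 2 + p = t + 2 + (p + 1) := by omega
    rw [e]

lemma loopB (m : Nat) :
    (fun (f : List Int) => f ++ [PySem.List.pyGetD f (-1) 0 + PySem.List.pyGetD f (-2) 0])^[m] [0, 1]
    = (List.range (m + 2)).map fib := by
  have h0 : ([0, 1] : List Int) = (List.range (0 + 2)).map fib := by
    simp [List.range_succ, fib]
  rw [h0, loopB_aux m 0]
  have e : 0 + 2 + m = m + 2 := by omega
  rw [e]

lemma fibn_neg (num : Int) (h : num < 0) : fib_n num = [] := by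
  unfold fib_n fib_n_loop1
  rw [PySem.List.pyRange_one_eq_nil (by omega : num ≤ 0),
      PySem.List.pyRange_one_eq_nil (by omega : num + 1 ≤ 0)]
  rfl

lemma fibn_alt_neg (num : Int) (h : num < 0) : fib_n_alt num = [] := by
  unfold fib_n_alt
  rw [PySem.List.pyRange_neg_one_eq_nil (by omega : num ≤ -1),
      PySem.List.pyRange_one_eq_nil (by omega : num + 1 ≤ 1)]
  simp

lemma fibn_alt_f_nat (n : Nat) : fib_n_alt_f (n : Int) = (List.range (n - 1 + 2)).map fib := by
  unfold fib_n_alt_f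
  rw [foldl_const]
  have hl : (PySem.List.pyRange 0 (max ((n : Int) - 1) 0) 1).length = n - 1 := by
    rw [PySem.List.length_pyRange_one]; omega
  rw [hl, loopB (n - 1)]

lemma fibn_nat (n : Nat) :
    fib_n (n : Int)
    = ((List.range (n + 1)).map sfib).reverse ++ (List.range n).map (fun j => fib (1 + j)) := by
  unfold fib_n fib_n_loop1
  rw [foldl_const, foldl_const]
  have hl1 : (PySem.List.pyRange 0 (n : Int) 1).length = n := by
    rw [PySem.List.length_pyRange_one]; omega
  have hl2 : (PySem.List.pyRange 0 ((n : Int) + 1) 1).length = n + 1 := by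
    rw [PySem.List.length_pyRange_one]; omega
  rw [hl1, hl2]
  have hinit1 : (([], 1, 1) : List Int × Int × Int) = ([], fib (0 + 1), fib (0 + 2)) := by
    norm_num [fib]
  rw [hinit1, loopA1 n [] 0]
  simp only [List.nil_append]
  have hinit2 : ((List.map (fun j => fib (0 + 1 + j)) (List.range n) : List Int), (0 : Int), (1 : Int))
      = ((List.map (fun j => fib (0 + 1 + j)) (List.range n) : List Int), sfib 0, sfib (0 + 1)) := by
    norm_num [sfib, fib]
  rw [hinit2, loopA2 (n + 1) _ 0]
  simp only [Nat.zero_add]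

lemma range_reverse_map {α : Type} (c : Nat) (g : Nat → α) :
    ((List.range (c + 1)).map g).reverse = (List.range (c + 1)).map (fun j => g (c - j)) := by
  refine List.ext_getElem (by simp) ?_
  intro i h1 h2
  simp only [List.length_reverse, List.length_map, List.length_range] at h1 h2
  simp only [List.getElem_reverse, List.getElem_map, List.getElem_range, List.length_map,
    List.length_range]
  congr 1

lemma fibn_alt_nat (n : Nat) :
    fib_n_alt (n : Int)
    = ((List.range (n + 1)).map sfib).reverse ++ (List.range n).map (fun j => fib (1 + j)) := by
  unfold fib_n_alt
  rw [fibn_alt_f_nat n]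
  have hf : ∀ (i : Int), 0 ≤ i → i ≤ (n : Int) →
      PySem.List.pyGetD ((List.range (n - 1 + 2)).map fib) i 0 = fib i.toNat := by
    intro i h0 hn
    rw [PySem.List.pyGetD_eq_getElem _ 0 h0
      (by simp only [List.length_map, List.length_range]; omega)]
    simp
  have hpre : (PySem.List.pyRange (n : Int) (-1) (-1)).map
        (fun k => (-1 : Int) ^ (k + 1).toNat
          * PySem.List.pyGetD ((List.range (n - 1 + 2)).map fib) k 0)
      = ((List.range (n + 1)).map sfib).reverse := by
    rw [PySem.List.pyRange_neg_one, List.map_map, range_reverse_map]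
    have hc : ((n : Int) - (-1)).toNat = n + 1 := by omega
    rw [hc]
    refine List.map_congr_left (fun j hj => ?_)
    simp only [List.mem_range] at hj
    simp only [Function.comp_apply]
    rw [hf ((n : Int) - j) (by omega) (by omega)]
    have h1 : ((n : Int) - j + 1).toNat = n - j + 1 := by omega
    have h2 : ((n : Int) - j).toNat = n - j := by omega
    rw [h1, h2, sfib]
  have hpos : (PySem.List.pyRange 1 ((n : Int) + 1) 1).map
        (fun k => PySem.List.pyGetD ((List.range (n - 1 + 2)).map fib) k 0)
      = (List.range n).map (fun j => fib (1 + j)) := by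
    rw [PySem.List.pyRange_one, List.map_map]
    have hc : ((n : Int) + 1 - 1).toNat = n := by omega
    rw [hc]
    refine List.map_congr_left (fun j hj => ?_)
    simp only [List.mem_range] at hj
    simp only [Function.comp_apply]
    rw [hf (1 + j) (by omega) (by omega)]
    congr 1
  rw [hpre, hpos]

-- ===== VERDICT (by name: the statement is the Claim_ definition above) =====
theorem fib_n_spec : Claim_equal_fib_n := by
  intro num _
  unfold Spec_fib_n
  rcases Int.lt_or_le num 0 with h | h
  · rw [fibn_neg num h, fibn_alt_neg num h]
  · obtain ⟨n, rfl⟩ := Int.eq_ofNat_of_zero_le h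
    rw [fibn_nat, fibn_alt_nat]
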